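-- pv_equiv track=rewrite | github.com/alexztorm/study_projects | yandex/algorithms_training_6/homework_2/task_F.py | sum_of_multiplications_3
-- ===== SOURCE A (Python) =====
-- def sum_of_multiplications_3(n: int, numbers: list[int]) -> int:
--     if n == 3:
--         return (numbers[0] * numbers[1] * numbers[2]) % 1000000007
--     else:
--         mult_sum = 0
--
--         pref_sum = [0]
--
--         for i in range(n):
--             pref_sum.append(pref_sum[i] + numbers[i])
--
--         for i in range(1, n - 1):
--             mult_sum += calc_prefix_sum(0, i - 1, pref_sum) * numbers[i] * calc_prefix_sum(i + 1, n - 1, pref_sum)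
--
--         return mult_sum % 1000000007
--
-- def calc_prefix_sum(l: int, r: int, prefix_sum: list[int]) -> int:
--     return prefix_sum[r + 1] - prefix_sum[l]
-- ===== SOURCE B (Python) =====
-- def sum_of_multiplications_3(n: int, numbers: list[int]) -> int:
--     s1 = s2 = s3 = 0
--     for i in range(n):
--         x = numbers[i]
--         s1 += x
--         s2 += x * x
--         s3 += x * x * x
--     e3 = (s1 * s1 * s1 - 3 * s1 * s2 + 2 * s3) // 6
--     return e3 % 1000000007
-- ===== Notes on version B (the rewrite author's own statement) =====
-- stated objective: simpler
-- what changed: Replaces the prefix-sum array and the per-index left*middle*right loop by a single pass accumulating the power sums s1,s2,s3 and the closed-form Newton identity e3=(s1^3-3*s1*s2+2*s3)//6 (exact division), dropping the n==3 special case; Pre_ excludes the inputs (1 <= n > len(numbers)) where both programs raise IndexError.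
import Mathlib
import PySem

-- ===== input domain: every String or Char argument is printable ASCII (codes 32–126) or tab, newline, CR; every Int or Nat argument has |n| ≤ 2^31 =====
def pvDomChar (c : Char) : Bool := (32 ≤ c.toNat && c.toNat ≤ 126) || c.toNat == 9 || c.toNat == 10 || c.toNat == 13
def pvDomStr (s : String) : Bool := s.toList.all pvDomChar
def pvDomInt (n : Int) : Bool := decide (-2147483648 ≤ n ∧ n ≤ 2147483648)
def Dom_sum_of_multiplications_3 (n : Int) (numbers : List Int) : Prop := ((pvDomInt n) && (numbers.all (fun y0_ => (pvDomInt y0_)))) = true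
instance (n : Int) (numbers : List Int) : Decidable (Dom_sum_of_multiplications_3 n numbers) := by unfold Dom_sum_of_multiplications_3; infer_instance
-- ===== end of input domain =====

-- B replaces A's prefix-sum array and left*middle*right loop by one pass of power sums and the
-- closed-form Newton identity e3 = (s1^3 - 3*s1*s2 + 2*s3) // 6 (objective: simpler).

-- ===== PORT A =====
def calc_prefix_sum (l r : Int) (prefix_sum : List Int) : Int :=
  PySem.List.pyGetD prefix_sum (r + 1) 0 - PySem.List.pyGetD prefix_sum l 0

def sum_of_multiplications_3 (n : Int) (numbers : List Int) : Int :=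
  if n = 3 then
    PySem.Int.mod
      (PySem.List.pyGetD numbers 0 0 * PySem.List.pyGetD numbers 1 0 *
        PySem.List.pyGetD numbers 2 0) 1000000007
  else
    let pref_sum : List Int :=
      (PySem.List.pyRange 0 n 1).foldl
        (fun ps i => ps ++ [PySem.List.pyGetD ps i 0 + PySem.List.pyGetD numbers i 0]) [0]
    let mult_sum : Int :=
      (PySem.List.pyRange 1 (n - 1) 1).foldl
        (fun acc i =>
          acc + calc_prefix_sum 0 (i - 1) pref_sum * PySem.List.pyGetD numbers i 0 *
            calc_prefix_sum (i + 1) (n - 1) pref_sum) 0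
    PySem.Int.mod mult_sum 1000000007

-- ===== PORT B =====
def sum_of_multiplications_3_alt (n : Int) (numbers : List Int) : Int :=
  let s : Int × Int × Int :=
    (PySem.List.pyRange 0 n 1).foldl
      (fun s i =>
        let x := PySem.List.pyGetD numbers i 0
        (s.1 + x, s.2.1 + x * x, s.2.2 + x * x * x)) (0, 0, 0)
  let e3 := PySem.Int.floordiv (s.1 * s.1 * s.1 - 3 * s.1 * s.2.1 + 2 * s.2.2) 6
  PySem.Int.mod e3 1000000007

-- ===== PRECONDITION & SPEC =====
-- Pre_ excludes exactly the inputs where A raises IndexError (so does B): 1 ≤ n with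
-- n > len(numbers); all other inputs (including n ≤ 0) are admitted.
def Pre_sum_of_multiplications_3 (n : Int) (numbers : List Int) : Prop :=
  n ≤ (numbers.length : Int)
instance (n : Int) (numbers : List Int) : Decidable (Pre_sum_of_multiplications_3 n numbers) := by
  unfold Pre_sum_of_multiplications_3; infer_instance

def pvWitness_sum_of_multiplications_3 : Int × List Int := (4, [1, 2, 3, 4])

def Spec_sum_of_multiplications_3 (n : Int) (numbers : List Int) (out : Int) : Prop := out = sum_of_multiplications_3_alt n numbers
instance (n : Int) (numbers : List Int) (out : Int) : Decidable (Spec_sum_of_multiplications_3 n numbers out) := by unfold Spec_sum_of_multiplications_3; infer_instance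

-- ===== CLAIM (what is proved, stated in full; the proofs are below) =====
def Claim_equal_sum_of_multiplications_3 : Prop := ∀ (n : Int) (numbers : List Int), Dom_sum_of_multiplications_3 n numbers → Pre_sum_of_multiplications_3 n numbers → Spec_sum_of_multiplications_3 n numbers (sum_of_multiplications_3 n numbers)

-- ===== LEMMAS AND PROOFS =====

-- e2L xs = sum over i<j of xs[i]*xs[j];  e3L xs = sum over i<j<k of xs[i]*xs[j]*xs[k]
def e2L : List Int → Int
  | [] => 0
  | a :: xs => a * xs.sum + e2L xs

def e3L : List Int → Int
  | [] => 0
  | a :: xs => a * e2L xs + e3L xs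

def sqSum (xs : List Int) : Int := (xs.map (fun x => x * x)).sum
def cbSum (xs : List Int) : Int := (xs.map (fun x => x * x * x)).sum

theorem two_e2L (xs : List Int) : 2 * e2L xs = xs.sum * xs.sum - sqSum xs := by
  induction xs with
  | nil => simp [e2L, sqSum]
  | cons a xs ih => simp [e2L, sqSum, List.sum_cons] at *; ring_nf; ring_nf at ih; omega

theorem six_e3L (xs : List Int) :
    6 * e3L xs = xs.sum * xs.sum * xs.sum - 3 * xs.sum * sqSum xs + 2 * cbSum xs := by
  induction xs with
  | nil => simp [e3L, sqSum, cbSum]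
  | cons a xs ih =>
    have h2 := two_e2L xs
    simp only [e3L, sqSum, cbSum, List.sum_cons, List.map_cons] at *
    linear_combination ih + 3 * a * h2

theorem e3L_small (xs : List Int) (h : xs.length ≤ 2) : e3L xs = 0 := by
  match xs, h with
  | [], _ => rfl
  | [a], _ => simp [e3L, e2L]
  | [a, b], _ => simp [e3L, e2L]

theorem foldTriple (ys : List Int) (a b c : Int) :
    ys.foldl (fun s x => (s.1 + x, s.2.1 + x * x, s.2.2 + x * x * x)) (a, b, c)
      = (a + ys.sum, b + sqSum ys, c + cbSum ys) := by
  induction ys generalizing a b c with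
  | nil => simp [sqSum, cbSum]
  | cons y ys ih =>
    simp only [List.foldl_cons, ih, sqSum, cbSum, List.sum_cons, List.map_cons]
    refine Prod.ext (by ring) (Prod.ext (by ring) (by ring))

theorem foldl_range_getD {α : Type} (numbers : List Int) (m : Nat) (hm : m ≤ numbers.length)
    (f : α → Int → α) (init : α) :
    (PySem.List.pyRange 0 (m : Int) 1).foldl
        (fun acc i => f acc (PySem.List.pyGetD numbers i 0)) init
      = (numbers.take m).foldl f init := by
  induction m generalizing init with
  | zero => simp [PySem.List.pyRange_one_eq_nil]
  | succ k ih =>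
    have hcast : ((k + 1 : Nat) : Int) = (k : Int) + 1 := by push_cast; ring
    rw [hcast, PySem.List.pyRange_one_succ_right (by positivity), List.foldl_append,
      ih (by omega), List.take_add_one, List.getElem?_eq_getElem (by omega), List.foldl_append]
    simp [PySem.List.pyGetD_natCast, List.getElem?_eq_getElem (show k < numbers.length by omega)]

theorem foldB (numbers : List Int) (m : Nat) (hm : m ≤ numbers.length) :
    (PySem.List.pyRange 0 (m : Int) 1).foldl
      (fun (s : Int × Int × Int) i =>
        (s.1 + PySem.List.pyGetD numbers i 0,
         s.2.1 + PySem.List.pyGetD numbers i 0 * PySem.List.pyGetD numbers i 0,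
         s.2.2 + PySem.List.pyGetD numbers i 0 * PySem.List.pyGetD numbers i 0 *
           PySem.List.pyGetD numbers i 0)) (0, 0, 0)
      = ((numbers.take m).sum, sqSum (numbers.take m), cbSum (numbers.take m)) := by
  have h := foldl_range_getD numbers m hm
      (fun (s : Int × Int × Int) x => (s.1 + x, s.2.1 + x * x, s.2.2 + x * x * x)) (0, 0, 0)
  simp only [] at h
  rw [h, foldTriple]
  simp

def mterm (ys : List Int) (i : Nat) : Int :=
  (ys.take i).sum * ys.getD i 0 * (ys.drop (i + 1)).sum

theorem sum_tail (ys : List Int) :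
    ((List.range ys.length).map (fun i => ys.getD i 0 * (ys.drop (i + 1)).sum)).sum = e2L ys := by
  induction ys with
  | nil => simp [e2L]
  | cons a ys ih =>
    rw [List.length_cons, List.range_succ_eq_map]
    simp only [List.map_cons, List.map_map, List.sum_cons]
    simp only [Function.comp_def, List.getD_cons_succ, List.drop_succ_cons, List.getD_cons_zero,
      List.drop_zero] at *
    rw [ih, e2L]

theorem sum_mterm (ys : List Int) :
    ((List.range ys.length).map (mterm ys)).sum = e3L ys := by
  induction ys with
  | nil => simp [e3L]
  | cons a ys ih =>
    rw [List.length_cons, List.range_succ_eq_map]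
    simp only [List.map_cons, List.map_map, List.sum_cons]
    have hterm : ∀ i : Nat, mterm (a :: ys) (i + 1)
        = a * (ys.getD i 0 * (ys.drop (i + 1)).sum) + mterm ys i := by
      intro i
      simp only [mterm, List.take_succ_cons, List.sum_cons, List.getD_cons_succ,
        List.drop_succ_cons]
      ring
    have h0 : mterm (a :: ys) 0 = 0 := by simp [mterm]
    simp only [Function.comp_def, hterm, h0]
    rw [PySem.List.sum_map_add_int, PySem.List.sum_map_const_mul_int, ih, sum_tail, e3L]
    ring

def prefL (numbers : List Int) (m : Nat) : List Int :=
  (List.range (m + 1)).map (fun k => (numbers.take k).sum)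

theorem prefL_getD (numbers : List Int) (m k : Nat) (hk : k ≤ m) :
    PySem.List.pyGetD (prefL numbers m) (k : Int) 0 = (numbers.take k).sum := by
  simp [PySem.List.pyGetD_natCast, prefL, List.getD_eq_getElem?_getD, List.getElem?_map,
    List.getElem?_range (show k < m + 1 by omega)]

theorem prefL_getD' (numbers : List Int) (m : Nat) (i : Int) (h0 : 0 ≤ i) (hi : i ≤ (m : Int)) :
    PySem.List.pyGetD (prefL numbers m) i 0 = (numbers.take i.toNat).sum := by
  have h : i = ((i.toNat : Nat) : Int) := by omega
  rw [h, prefL_getD numbers m i.toNat (by omega)]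
  have h2 : (max i 0).toNat = i.toNat := by omega
  simp only [Int.toNat_natCast]

theorem prefA (numbers : List Int) (m : Nat) (hm : m ≤ numbers.length) :
    (PySem.List.pyRange 0 (m : Int) 1).foldl
        (fun ps i => ps ++ [PySem.List.pyGetD ps i 0 + PySem.List.pyGetD numbers i 0]) [0]
      = prefL numbers m := by
  induction m with
  | zero => simp [prefL, PySem.List.pyRange_one_eq_nil]
  | succ k ih =>
    have hcast : ((k + 1 : Nat) : Int) = (k : Int) + 1 := by push_cast; ring
    rw [hcast, PySem.List.pyRange_one_succ_right (by positivity), List.foldl_append, ih (by omega)]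
    simp only [List.foldl_cons, List.foldl_nil, prefL_getD numbers k k le_rfl,
      PySem.List.pyGetD_natCast]
    have hsum : (numbers.take (k + 1)).sum = (numbers.take k).sum + numbers.getD k 0 := by
      rw [List.take_add_one, List.getElem?_eq_getElem (show k < numbers.length by omega),
        List.getD_eq_getElem _ _ (show k < numbers.length by omega), List.sum_append]
      simp
    have hstep : prefL numbers (k + 1) = prefL numbers k ++ [(numbers.take (k + 1)).sum] := by
      rw [prefL, prefL, List.range_succ, List.map_append]; rfl
    rw [hstep, hsum]

theorem sum_mterm_trim (ys : List Int) (m : Nat) (hlen : ys.length = m) (h2 : 2 ≤ m) :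
    ((List.range (m - 2)).map (fun k => mterm ys (k + 1))).sum = e3L ys := by
  rw [← sum_mterm ys, hlen]
  have hm : m = (m - 2) + 1 + 1 := by omega
  conv_rhs => rw [hm, List.range_succ, List.range_succ_eq_map]
  have hlast : mterm ys (m - 2 + 1) = 0 := by
    have : ys.drop (m - 2 + 1 + 1) = [] := by
      apply List.drop_eq_nil_of_le; omega
    simp [mterm, this]
  have h0 : mterm ys 0 = 0 := by simp [mterm]
  simp only [List.map_append, List.map_cons, List.map_map, List.sum_append, List.sum_cons,
    List.map_nil, List.sum_nil, hlast, h0, Function.comp_def, Nat.succ_eq_add_one]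
  ring

theorem multA (numbers : List Int) (m : Nat) (hm : m ≤ numbers.length) :
    (PySem.List.pyRange 1 ((m : Int) - 1) 1).foldl
        (fun acc i => acc +
          (PySem.List.pyGetD (prefL numbers m) ((i - 1) + 1) 0 -
            PySem.List.pyGetD (prefL numbers m) 0 0) *
            PySem.List.pyGetD numbers i 0 *
          (PySem.List.pyGetD (prefL numbers m) (((m : Int) - 1) + 1) 0 -
            PySem.List.pyGetD (prefL numbers m) (i + 1) 0)) 0
      = e3L (numbers.take m) := by
  by_cases h2 : m ≤ 2
  · rw [PySem.List.pyRange_one_eq_nil (by omega : (m : Int) - 1 ≤ 1), List.foldl_nil]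
    rw [e3L_small _ (by simp; omega)]
  · set ys := numbers.take m with hys
    have hlen : ys.length = m := by simp [hys]; omega
    rw [PySem.List.foldl_add, PySem.List.pyRange_one]
    have htn : ((m : Int) - 1 - 1).toNat = m - 2 := by omega
    rw [htn, List.map_map]
    have hcong : ∀ k ∈ List.range (m - 2),
        (PySem.List.pyGetD (prefL numbers m) ((1 + (k : Int) - 1) + 1) 0 -
            PySem.List.pyGetD (prefL numbers m) 0 0) *
            PySem.List.pyGetD numbers (1 + (k : Int)) 0 *
          (PySem.List.pyGetD (prefL numbers m) (((m : Int) - 1) + 1) 0 -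
            PySem.List.pyGetD (prefL numbers m) ((1 + (k : Int)) + 1) 0)
          = mterm ys (k + 1) := by
      intro k hk
      rw [List.mem_range] at hk
      rw [prefL_getD' numbers m (1 + (k : Int) - 1 + 1) (by omega) (by omega),
        prefL_getD' numbers m 0 (by omega) (by omega),
        prefL_getD' numbers m ((m : Int) - 1 + 1) (by omega) (by omega),
        prefL_getD' numbers m (1 + (k : Int) + 1) (by omega) (by omega),
        show ((1 : Int) + k - 1 + 1).toNat = k + 1 by omega,
        show ((0 : Int)).toNat = 0 by omega,
        show ((m : Int) - 1 + 1).toNat = m by omega,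
        show ((1 : Int) + k + 1).toNat = k + 2 by omega,
        show (1 : Int) + k = ((k + 1 : Nat) : Int) by push_cast; ring,
        PySem.List.pyGetD_natCast]
      have ht1 : numbers.take (k + 1) = ys.take (k + 1) := by
        rw [hys, List.take_take]; congr 1; omega
      have ht2 : numbers.take (k + 2) = ys.take (k + 2) := by
        rw [hys, List.take_take]; congr 1; omega
      have htm : numbers.take m = ys := hys
      have hx : numbers.getD (k + 1) 0 = ys.getD (k + 1) 0 := by
        rw [List.getD_eq_getElem _ _ (by omega), List.getD_eq_getElem _ _ (by omega)]
        simp [hys, List.getElem_take]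
      have hdrop : ys.sum - (ys.take (k + 2)).sum = (ys.drop (k + 2)).sum := by
        have := List.sum_take_add_sum_drop ys (k + 2); omega
      rw [ht1, ht2, htm, hx]
      simp only [List.take_zero, List.sum_nil, sub_zero]
      rw [hdrop]
      simp [mterm]
    simp only [Function.comp_def]
    rw [List.map_congr_left hcong, sum_mterm_trim ys m hlen (by omega)]
    omega

theorem altEq (n : Int) (numbers : List Int) (hn : n ≤ (numbers.length : Int)) :
    sum_of_multiplications_3_alt n numbers
      = PySem.Int.mod (e3L (numbers.take n.toNat)) 1000000007 := by
  unfold sum_of_multiplications_3_alt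
  by_cases hneg : n ≤ 0
  · rw [PySem.List.pyRange_one_eq_nil (by omega), show n.toNat = 0 by omega]
    simp [e3L]
  · have hcast : n = ((n.toNat : Nat) : Int) := by omega
    conv_lhs => rw [hcast]
    simp only []
    rw [foldB numbers n.toNat (by omega)]
    simp only []
    rw [show (numbers.take n.toNat).sum * (numbers.take n.toNat).sum * (numbers.take n.toNat).sum
        - 3 * (numbers.take n.toNat).sum * sqSum (numbers.take n.toNat)
        + 2 * cbSum (numbers.take n.toNat) = 6 * e3L (numbers.take n.toNat) from
      (six_e3L (numbers.take n.toNat)).symm]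
    rw [PySem.Int.floordiv_eq_ediv_of_pos (by norm_num)]
    congr 1
    omega

theorem aEq (n : Int) (numbers : List Int) (hn : n ≤ (numbers.length : Int)) (h3 : n ≠ 3) :
    sum_of_multiplications_3 n numbers
      = PySem.Int.mod (e3L (numbers.take n.toNat)) 1000000007 := by
  unfold sum_of_multiplications_3 calc_prefix_sum
  rw [if_neg h3]
  by_cases hneg : n ≤ 0
  · rw [PySem.List.pyRange_one_eq_nil (by omega : n - 1 ≤ 1)]
    simp [show n.toNat = 0 by omega, e3L]
  · have hcast : n = ((n.toNat : Nat) : Int) := by omega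
    conv_lhs => rw [hcast]
    simp only [prefA numbers n.toNat (by omega), multA numbers n.toNat (by omega)]

-- ===== VERDICT (by name: the statement is the Claim_ definition above) =====
theorem sum_of_multiplications_3_spec : Claim_equal_sum_of_multiplications_3 := by
  intro n numbers _ hpre
  unfold Spec_sum_of_multiplications_3
  unfold Pre_sum_of_multiplications_3 at hpre
  by_cases h3 : n = 3
  · subst h3
    have hlen : 3 ≤ numbers.length := by omega
    match numbers, hlen with
    | a :: b :: c :: rest, _ =>
      rw [altEq 3 (a :: b :: c :: rest) (by simp; omega)]
      unfold sum_of_multiplications_3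
      rw [if_pos rfl]
      have h0 : PySem.List.pyGetD (a :: b :: c :: rest) 0 0 = a := by
        rw [show (0 : Int) = ((0 : Nat) : Int) from rfl, PySem.List.pyGetD_natCast]; rfl
      have h1 : PySem.List.pyGetD (a :: b :: c :: rest) 1 0 = b := by
        rw [show (1 : Int) = ((1 : Nat) : Int) from rfl, PySem.List.pyGetD_natCast]; rfl
      have h2 : PySem.List.pyGetD (a :: b :: c :: rest) 2 0 = c := by
        rw [show (2 : Int) = ((2 : Nat) : Int) from rfl, PySem.List.pyGetD_natCast]; rfl
      rw [h0, h1, h2, show ((3 : Int).toNat) = 3 from rfl]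
      simp [e3L, e2L]
      congr 1
      ring
  · rw [aEq n numbers hpre h3, altEq n numbers hpre]
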